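-- pv_equiv track=rewrite | github.com/Swuzz123/Test | src/agents/assistant/utils/scorer.py | get_next_category_to_ask
-- ===== SOURCE A (Python) =====
-- from typing import Dict, List, Tuple
--
-- def get_next_category_to_ask(missing_categories: List[str]) -> str:
--   """Get highest priority missing category"""
--   if not missing_categories:
--     return "general_details"
--
--   # Priority order (most important first)
--   priority = [
--     "project_type",
--     "core_features",
--     "business_goals"
--   ]
--
--   for cat in priority:
--     if cat in missing_categories:
--       return cat
--
--   return missing_categories[0]
-- ===== SOURCE B (Python) =====
-- def get_next_category_to_ask(missing_categories):
--     """Get highest priority missing category"""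
--     if not missing_categories:
--         return "general_details"
--     priority = ["project_type", "core_features", "business_goals"]
--     rank = {cat: i for i, cat in enumerate(priority)}
--     return min(missing_categories, key=lambda c: rank.get(c, len(priority)))
-- ===== Notes on version B (the rewrite author's own statement) =====
-- stated objective: idiomatic
-- what changed: Instead of scanning the priority list and testing membership in missing_categories for each entry, B builds a rank table once and takes min(missing_categories, key=rank); min's first-minimum stability reproduces the missing_categories[0] fallback when no priority category is present.
import Mathlib
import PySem

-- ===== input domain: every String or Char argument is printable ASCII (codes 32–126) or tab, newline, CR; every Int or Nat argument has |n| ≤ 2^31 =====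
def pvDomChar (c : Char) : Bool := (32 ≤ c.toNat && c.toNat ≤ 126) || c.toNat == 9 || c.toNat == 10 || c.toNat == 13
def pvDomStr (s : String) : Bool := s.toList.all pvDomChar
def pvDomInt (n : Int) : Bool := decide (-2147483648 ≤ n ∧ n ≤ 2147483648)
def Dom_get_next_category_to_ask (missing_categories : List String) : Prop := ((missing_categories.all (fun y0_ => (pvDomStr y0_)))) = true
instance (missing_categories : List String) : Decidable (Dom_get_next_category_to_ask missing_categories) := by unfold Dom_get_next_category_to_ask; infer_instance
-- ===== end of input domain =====

-- B replaces A's scan of the priority list (with a membership test per entry) by a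
-- single min over missing_categories keyed by a precomputed rank table (idiomatic).

-- ===== PORT A =====
def get_next_category_to_ask (missing_categories : List String) : String :=
  if missing_categories = [] then "general_details"
  else
    let priority : List String := ["project_type", "core_features", "business_goals"]
    match priority.find? (fun cat => missing_categories.contains cat) with
    | some c => c
    | none => PySem.List.pyGetD missing_categories 0 "general_details"

-- ===== PORT B =====
def get_next_category_to_ask_alt (missing_categories : List String) : String :=
  if missing_categories = [] then "general_details"
  else
    let priority : List String := ["project_type", "core_features", "business_goals"]
    let rank : PySem.Dict String Int :=
      PySem.Dict.ofList ((PySem.List.enumerate priority).map (fun p => (p.2, p.1)))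
    (PySem.List.min? missing_categories
        (fun c => rank.getD c (priority.length : Int))).getD "general_details"

-- ===== PRECONDITION & SPEC =====
def Spec_get_next_category_to_ask (missing_categories : List String) (out : String) : Prop := out = get_next_category_to_ask_alt missing_categories
instance (missing_categories : List String) (out : String) : Decidable (Spec_get_next_category_to_ask missing_categories out) := by unfold Spec_get_next_category_to_ask; infer_instance

-- ===== CLAIM =====
def Claim_equal_get_next_category_to_ask : Prop := ∀ (missing_categories : List String), Dom_get_next_category_to_ask missing_categories → Spec_get_next_category_to_ask missing_categories (get_next_category_to_ask missing_categories)

-- ===== LEMMAS AND PROOFS =====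

-- B's key function, in closed form
def pvKey (c : String) : Int :=
  if c = "project_type" then 0 else if c = "core_features" then 1
  else if c = "business_goals" then 2 else 3

lemma pvKey_eq (c : String) :
    (PySem.Dict.ofList ((PySem.List.enumerate
        (["project_type", "core_features", "business_goals"] : List String)).map
        (fun p => (p.2, p.1)))).getD c ((["project_type", "core_features", "business_goals"] : List String).length : Int)
      = pvKey c := by
  by_cases h1 : c = "project_type"
  · subst h1; decide
  by_cases h2 : c = "core_features"
  · subst h2; decide
  by_cases h3 : c = "business_goals"
  · subst h3; decide
  have hitems : (PySem.Dict.ofList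
      [("project_type", (0 : Int)), ("core_features", 1), ("business_goals", 2)]).items
      = [("project_type", (0 : Int)), ("core_features", 1), ("business_goals", 2)] := by decide
  have b1 : ("project_type" == c) = false := beq_eq_false_iff_ne.mpr (Ne.symm h1)
  have b2 : ("core_features" == c) = false := beq_eq_false_iff_ne.mpr (Ne.symm h2)
  have b3 : ("business_goals" == c) = false := beq_eq_false_iff_ne.mpr (Ne.symm h3)
  simp [PySem.Dict.getD, PySem.Dict.get?, hitems, List.find?, pvKey, h1, h2, h3, b1, b2, b3]

-- running-min step
def pvStep (m c : String) : String := if pvKey c < pvKey m then c else m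

lemma min?_cons_foldl (x : String) (t : List String) (key : String → Int) :
    PySem.List.min? (x :: t) key =
      some (t.foldl (fun m c => if key c < key m then c else m) x) := by
  show List.foldl _ (some x) t = _
  induction t generalizing x with
  | nil => rfl
  | cons c rs ih =>
      simp only [List.foldl]
      by_cases h : key c < key x <;> simp [h, ih]

lemma foldl_no_update (m : String) (t : List String)
    (h : ∀ c ∈ t, ¬ pvKey c < pvKey m) :
    t.foldl pvStep m = m := by
  induction t with
  | nil => rfl
  | cons c rs ih =>
      have hc : ¬ pvKey c < pvKey m := h c (by simp)
      simp only [List.foldl, pvStep, if_neg hc]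
      exact ih (fun d hd => h d (by simp [hd]))

lemma foldl_unique_min (t0 : String) (k : Int) (ht0 : pvKey t0 = k)
    (huniq : ∀ c, pvKey c = k → c = t0) :
    ∀ (t : List String) (m : String), (∀ c ∈ m :: t, k ≤ pvKey c) →
      t0 ∈ m :: t → t.foldl pvStep m = t0 := by
  intro t
  induction t with
  | nil =>
      intro m _ hmem
      have : t0 = m := by simpa using hmem
      simp [this]
  | cons c rs ih =>
      intro m hlb hmem
      simp only [List.foldl]
      have hkm : k ≤ pvKey m := hlb m (by simp)
      have hkc : k ≤ pvKey c := hlb c (by simp)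
      have hlb' : ∀ d ∈ pvStep m c :: rs, k ≤ pvKey d := by
        intro d hd
        rcases List.mem_cons.mp hd with h | h
        · subst h
          unfold pvStep; split_ifs <;> assumption
        · exact hlb d (by simp [h])
      apply ih (pvStep m c) hlb'
      rcases List.mem_cons.mp hmem with h | h
      · -- t0 = m : key m = k, so c cannot beat it
        subst h
        have hnc : ¬ pvKey c < pvKey t0 := by omega
        simp [pvStep, hnc]
      · rcases List.mem_cons.mp h with h | h
        · -- t0 = c
          subst h
          by_cases hlt : pvKey t0 < pvKey m
          · simp [pvStep, hlt]
          · have hm : pvKey m = k := by omega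
            have hme : m = t0 := huniq m hm
            simp [pvStep, hme]
        · simp [h]

lemma pvKey_nonneg (c : String) : 0 ≤ pvKey c := by
  unfold pvKey; split_ifs <;> omega

-- B on a nonempty list, reduced to the foldl form
lemma alt_eq_foldl (x : String) (rest : List String) :
    get_next_category_to_ask_alt (x :: rest) = rest.foldl pvStep x := by
  unfold get_next_category_to_ask_alt
  simp only [if_neg (by simp : ¬ (x :: rest : List String) = [])]
  have hk : (fun c => (PySem.Dict.ofList ((PySem.List.enumerate
      (["project_type", "core_features", "business_goals"] : List String)).map
      (fun p => (p.2, p.1)))).getD c ((["project_type", "core_features", "business_goals"] : List String).length : Int)) = pvKey := by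
    funext c; exact pvKey_eq c
  rw [hk, min?_cons_foldl]
  rfl

-- ===== VERDICT =====
theorem get_next_category_to_ask_spec : Claim_equal_get_next_category_to_ask := by
  unfold Claim_equal_get_next_category_to_ask
  intro m _
  unfold Spec_get_next_category_to_ask
  cases m with
  | nil => rfl
  | cons x rest =>
      rw [alt_eq_foldl]
      unfold get_next_category_to_ask
      simp only [if_neg (by simp : ¬ (x :: rest : List String) = [])]
      by_cases h1 : "project_type" ∈ x :: rest
      · have : (["project_type", "core_features", "business_goals"] : List String).find?
            (fun cat => (x :: rest).contains cat) = some "project_type" := by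
          simp [List.find?, h1]
        rw [this]
        exact (foldl_unique_min "project_type" 0 (by simp [pvKey])
          (by intro c hc; unfold pvKey at hc; split_ifs at hc <;> simp_all)
          rest x (fun c _ => pvKey_nonneg c) h1).symm
      · by_cases h2 : "core_features" ∈ x :: rest
        · have : (["project_type", "core_features", "business_goals"] : List String).find?
              (fun cat => (x :: rest).contains cat) = some "core_features" := by
            simp [List.find?, h1, h2]
          rw [this]
          refine (foldl_unique_min "core_features" 1 (by simp [pvKey])
            (by intro c hc; unfold pvKey at hc; split_ifs at hc <;> simp_all)
            rest x ?_ h2).symm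
          intro c hc
          have : pvKey c ≠ 0 := by
            intro h0
            have : c = "project_type" := by
              unfold pvKey at h0; split_ifs at h0 <;> simp_all
            exact h1 (this ▸ hc)
          have := pvKey_nonneg c; omega
        · by_cases h3 : "business_goals" ∈ x :: rest
          · have : (["project_type", "core_features", "business_goals"] : List String).find?
                (fun cat => (x :: rest).contains cat) = some "business_goals" := by
              simp [List.find?, h1, h2, h3]
            rw [this]
            refine (foldl_unique_min "business_goals" 2 (by simp [pvKey])
              (by intro c hc; unfold pvKey at hc; split_ifs at hc <;> simp_all)
              rest x ?_ h3).symm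
            intro c hc
            have hp : c ≠ "project_type" := fun h => h1 (h ▸ hc)
            have hf : c ≠ "core_features" := fun h => h2 (h ▸ hc)
            unfold pvKey; split_ifs <;> first | omega | simp_all
          · have hfind : (["project_type", "core_features", "business_goals"] : List String).find?
                (fun cat => (x :: rest).contains cat) = none := by
              simp [List.find?, h1, h2, h3]
            rw [hfind]
            have hall : ∀ c ∈ x :: rest, pvKey c = 3 := by
              intro c hc
              have hp : c ≠ "project_type" := fun h => h1 (h ▸ hc)
              have hf : c ≠ "core_features" := fun h => h2 (h ▸ hc)
              have hb : c ≠ "business_goals" := fun h => h3 (h ▸ hc)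
              simp [pvKey, hp, hf, hb]
            rw [foldl_no_update x rest (by
              intro c hc
              have := hall c (by simp [hc])
              have := hall x (by simp)
              omega)]
            simp [PySem.List.pyGetD_zero_cons]
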